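-- pv_equiv track=rewrite | github.com/1st-award/codetree-TILs | 240108/괄호 쌍 만들어주기 2/pair-parentheses-2.py | solution
-- ===== SOURCE A (Python) =====
-- def solution(pattern):
--     count = 0
--     for s_idx in range(len(pattern) -1):
--         open_pattern = pattern[s_idx:s_idx + 2]
--         if open_pattern.count("(") != 2:
--             continue
--         for e_idx in range(s_idx + 2, len(pattern) - 1):
--             close_pattern = pattern[e_idx: e_idx + 2]
--             if close_pattern.count(")") == 2:
--                 count += 1
--     return count
-- ===== SOURCE B (Python) =====
-- def solution(pattern):
--     n = len(pattern)
--     total = 0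
--     suff = 0  # running count of double-close windows starting in [i+2, n-2]
--     for i in range(n - 2, -1, -1):
--         if i + 4 <= n and pattern[i + 2] == ')' and pattern[i + 3] == ')':
--             suff += 1
--         if pattern[i] == '(' and pattern[i + 1] == '(':
--             total += suff
--     return total
-- ===== Notes on version B (the rewrite author's own statement) =====
-- stated objective: faster
-- what changed: Replaced the nested rescan of all later double-close windows for every double-open window by a single right-to-left pass that maintains a running suffix count of double-close window positions.
import Mathlib
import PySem

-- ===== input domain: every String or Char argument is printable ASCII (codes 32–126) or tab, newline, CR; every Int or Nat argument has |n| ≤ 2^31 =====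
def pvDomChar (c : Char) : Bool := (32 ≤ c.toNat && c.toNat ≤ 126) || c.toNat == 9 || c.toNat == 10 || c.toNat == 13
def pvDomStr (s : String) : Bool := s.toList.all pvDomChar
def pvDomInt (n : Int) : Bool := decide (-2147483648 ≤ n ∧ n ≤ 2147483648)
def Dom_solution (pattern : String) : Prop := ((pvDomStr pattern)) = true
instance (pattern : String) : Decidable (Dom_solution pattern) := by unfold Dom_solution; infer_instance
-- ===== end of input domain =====

-- B replaces A's quadratic nested rescan by one right-to-left pass keeping a running
-- suffix count of double-close windows (objective: faster, asymptotic).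

-- ===== PORT A =====
def solution (pattern : String) : Int :=
  let cs := pattern.toList
  (PySem.List.pyRange 0 (PySem.List.len cs - 1) 1).foldl (fun count s_idx =>
    let open_pattern := PySem.List.slice cs (some s_idx) (some (s_idx + 2))
    if PySem.List.count open_pattern '(' ≠ 2 then count
    else
      (PySem.List.pyRange (s_idx + 2) (PySem.List.len cs - 1) 1).foldl (fun count e_idx =>
        let close_pattern := PySem.List.slice cs (some e_idx) (some (e_idx + 2))
        if PySem.List.count close_pattern ')' = 2 then count + 1 else count) count) 0

-- ===== PORT B =====
def solution_alt (pattern : String) : Int :=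
  let cs := pattern.toList
  let n : Int := PySem.List.len cs
  ((PySem.List.pyRange (n - 2) (-1) (-1)).foldl (fun (st : Int × Int) i =>
    let suff := if i + 4 ≤ n ∧ PySem.List.pyGetD cs (i + 2) ' ' = ')'
                    ∧ PySem.List.pyGetD cs (i + 3) ' ' = ')' then st.2 + 1 else st.2
    let total := if PySem.List.pyGetD cs i ' ' = '(' ∧ PySem.List.pyGetD cs (i + 1) ' ' = '('
                 then st.1 + suff else st.1
    (total, suff)) (0, 0)).1

-- ===== PRECONDITION & SPEC =====
def Spec_solution (pattern : String) (out : Int) : Prop := out = solution_alt pattern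
instance (pattern : String) (out : Int) : Decidable (Spec_solution pattern out) := by unfold Spec_solution; infer_instance

-- ===== CLAIM (what is proved, stated in full; the proofs are below) =====
def Claim_equal_solution : Prop := ∀ (pattern : String), Dom_solution pattern → Spec_solution pattern (solution pattern)

-- ===== LEMMAS AND PROOFS =====

-- the double-open / double-close window tests as Booleans on the char list
def pvOpen (cs : List Char) (i : Int) : Bool :=
  PySem.List.pyGetD cs i ' ' == '(' && PySem.List.pyGetD cs (i + 1) ' ' == '('
def pvClose (cs : List Char) (i : Int) : Bool :=
  PySem.List.pyGetD cs i ' ' == ')' && PySem.List.pyGetD cs (i + 1) ' ' == ')'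

-- number of double-close windows starting in [a, len-1)
def pvC (cs : List Char) (a : Int) : Int :=
  ((PySem.List.pyRange a (PySem.List.len cs - 1) 1).countP (pvClose cs) : Int)

-- the per-index summand of both programs
def pvG (cs : List Char) (s : Int) : Int :=
  if pvOpen cs s then pvC cs (s + 2) else 0

theorem pv_slice_two (cs : List Char) (i : Int) (h0 : 0 ≤ i) (h : i < PySem.List.len cs - 1) :
    PySem.List.slice cs (some i) (some (i + 2)) =
      [PySem.List.pyGetD cs i ' ', PySem.List.pyGetD cs (i + 1) ' '] := by
  rw [PySem.List.len_eq] at h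
  have ga : PySem.List.pyGetD cs i ' ' = cs[i.toNat]'(by omega) :=
    PySem.List.pyGetD_eq_getElem cs ' ' h0 (by omega)
  have gb : PySem.List.pyGetD cs (i + 1) ' ' = cs[i.toNat + 1]'(by omega) := by
    rw [PySem.List.pyGetD_eq_getElem cs ' ' (by omega) (by omega)]
    congr 1
    omega
  rw [ga, gb, PySem.List.slice_toNat cs h0 (by omega),
      show (i + 2).toNat - i.toNat = 2 by omega,
      List.drop_eq_getElem_cons (by omega : i.toNat < cs.length),
      List.drop_eq_getElem_cons (by omega : i.toNat + 1 < cs.length)]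
  rfl

theorem pv_open_iff (cs : List Char) (i : Int) (h0 : 0 ≤ i) (h : i < PySem.List.len cs - 1) :
    (PySem.List.count (PySem.List.slice cs (some i) (some (i + 2))) '(' = 2) ↔ pvOpen cs i = true := by
  rw [pv_slice_two cs i h0 h, PySem.List.count_eq, pvOpen]
  rcases Bool.eq_false_or_eq_true (PySem.List.pyGetD cs i ' ' == '(') with h1 | h1 <;>
    rcases Bool.eq_false_or_eq_true (PySem.List.pyGetD cs (i + 1) ' ' == '(') with h2 | h2 <;>
    simp [List.count_cons, h1, h2]

theorem pv_close_iff (cs : List Char) (i : Int) (h0 : 0 ≤ i) (h : i < PySem.List.len cs - 1) :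
    (PySem.List.count (PySem.List.slice cs (some i) (some (i + 2))) ')' = 2) ↔ pvClose cs i = true := by
  rw [pv_slice_two cs i h0 h, PySem.List.count_eq, pvClose]
  rcases Bool.eq_false_or_eq_true (PySem.List.pyGetD cs i ' ' == ')') with h1 | h1 <;>
    rcases Bool.eq_false_or_eq_true (PySem.List.pyGetD cs (i + 1) ' ' == ')') with h2 | h2 <;>
    simp [List.count_cons, h1, h2]

-- A's inner loop: a suffix count
theorem pv_A_inner (cs : List Char) (s a : Int) (h0 : 0 ≤ s) :
    ((PySem.List.pyRange (s + 2) (PySem.List.len cs - 1) 1).foldl (fun count e_idx =>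
        if PySem.List.count (PySem.List.slice cs (some e_idx) (some (e_idx + 2))) ')' = 2
        then count + 1 else count) a) = a + pvC cs (s + 2) := by
  rw [PySem.List.foldl_ite_add_one, pvC]
  congr 1
  norm_cast
  apply List.countP_congr
  intro e he
  rw [PySem.List.mem_pyRange_one] at he
  simpa using pv_close_iff cs e (by omega) he.2

-- A's outer loop turns into a sum of pvG
theorem pv_A_outer (cs : List Char) (l : List Int) (a : Int)
    (hl : ∀ s ∈ l, 0 ≤ s ∧ s < PySem.List.len cs - 1) :
    (l.foldl (fun count s_idx =>
      if PySem.List.count (PySem.List.slice cs (some s_idx) (some (s_idx + 2))) '(' ≠ 2 then count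
      else
        (PySem.List.pyRange (s_idx + 2) (PySem.List.len cs - 1) 1).foldl (fun count e_idx =>
          if PySem.List.count (PySem.List.slice cs (some e_idx) (some (e_idx + 2))) ')' = 2
          then count + 1 else count) count) a)
    = a + (l.map (pvG cs)).sum := by
  induction l generalizing a with
  | nil => simp
  | cons s l ih =>
    obtain ⟨hs0, hs1⟩ := hl s (List.mem_cons_self ..)
    have step : (if PySem.List.count (PySem.List.slice cs (some s) (some (s + 2))) '(' ≠ 2 then a
        else
          (PySem.List.pyRange (s + 2) (PySem.List.len cs - 1) 1).foldl (fun count e_idx =>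
            if PySem.List.count (PySem.List.slice cs (some e_idx) (some (e_idx + 2))) ')' = 2
            then count + 1 else count) a) = a + pvG cs s := by
      rw [pvG]
      by_cases ho : pvOpen cs s = true
      · rw [if_neg (not_not_intro ((pv_open_iff cs s hs0 hs1).mpr ho)),
            pv_A_inner cs s a hs0, if_pos ho]
      · rw [if_pos (fun hc => ho ((pv_open_iff cs s hs0 hs1).mp hc)), if_neg ho]
        omega
    simp only [List.foldl_cons, List.map_cons, List.sum_cons, step,
      ih _ (fun x hx => hl x (List.mem_cons_of_mem _ hx))]
    omega

-- pvC peels one window / vanishes past the end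
theorem pv_C_step (cs : List Char) (a : Int) (h : a < PySem.List.len cs - 1) :
    pvC cs a = pvC cs (a + 1) + (if pvClose cs a then 1 else 0) := by
  rw [pvC, pvC, PySem.List.pyRange_one_cons h, List.countP_cons]
  by_cases hc : pvClose cs a = true <;> simp [hc]

theorem pv_C_top (cs : List Char) (a : Int) (h : PySem.List.len cs - 1 ≤ a) :
    pvC cs a = 0 := by
  rw [pvC, PySem.List.pyRange_one_eq_nil h]
  rfl

-- B's loop invariant: starting at i = k - 1 with suff = pvC (k + 2),
-- the pass accumulates the pvG-sum over [0, k)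
theorem pv_B_aux (cs : List Char) (k : Nat) (t : Int)
    (hk : (k : Int) ≤ PySem.List.len cs - 1) :
    (((PySem.List.pyRange ((k : Int) - 1) (-1) (-1)).foldl (fun (st : Int × Int) i =>
      let suff := if i + 4 ≤ PySem.List.len cs ∧ PySem.List.pyGetD cs (i + 2) ' ' = ')'
                      ∧ PySem.List.pyGetD cs (i + 3) ' ' = ')' then st.2 + 1 else st.2
      let total := if PySem.List.pyGetD cs i ' ' = '(' ∧ PySem.List.pyGetD cs (i + 1) ' ' = '('
                   then st.1 + suff else st.1
      (total, suff)) (t, pvC cs ((k : Int) + 2))).1)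
    = t + ((PySem.List.pyRange 0 (k : Int) 1).map (pvG cs)).sum := by
  induction k generalizing t with
  | zero =>
    rw [PySem.List.pyRange_neg_one_eq_nil (by omega), PySem.List.pyRange_one_eq_nil (by omega)]
    simp
  | succ k ih =>
    push_cast
    have hcons : PySem.List.pyRange ((k : Int) + 1 - 1) (-1) (-1)
        = (k : Int) :: PySem.List.pyRange ((k : Int) - 1) (-1) (-1) := by
      have : ((k : Int) + 1 - 1) = (k : Int) := by omega
      rw [this, PySem.List.pyRange_neg_one_cons (by omega)]
    have hguard : ((k : Int) + 4 ≤ PySem.List.len cs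
          ∧ PySem.List.pyGetD cs ((k : Int) + 2) ' ' = ')'
          ∧ PySem.List.pyGetD cs ((k : Int) + 3) ' ' = ')')
        ↔ ((k : Int) + 2 < PySem.List.len cs - 1 ∧ pvClose cs ((k : Int) + 2) = true) := by
      rw [pvClose]
      simp only [PySem.List.len_eq, Bool.and_eq_true, beq_iff_eq]
      constructor
      · rintro ⟨hx, hy, hz⟩
        exact ⟨by omega, hy, by rw [show (k : Int) + 2 + 1 = (k : Int) + 3 by omega]; exact hz⟩
      · rintro ⟨hx, hy, hz⟩
        exact ⟨by omega, hy, by rw [show (k : Int) + 3 = (k : Int) + 2 + 1 by omega]; exact hz⟩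
    have hsuff : (if (k : Int) + 4 ≤ PySem.List.len cs
          ∧ PySem.List.pyGetD cs ((k : Int) + 2) ' ' = ')'
          ∧ PySem.List.pyGetD cs ((k : Int) + 3) ' ' = ')'
        then pvC cs ((k : Int) + 1 + 2) + 1 else pvC cs ((k : Int) + 1 + 2))
        = pvC cs ((k : Int) + 2) := by
      have h3 : (k : Int) + 1 + 2 = (k : Int) + 2 + 1 := by omega
      by_cases hin : (k : Int) + 2 < PySem.List.len cs - 1
      · by_cases hc : pvClose cs ((k : Int) + 2) = true
        · rw [if_pos (hguard.mpr ⟨hin, hc⟩), h3, pv_C_step cs _ hin, if_pos hc]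
        · rw [if_neg (fun hg => hc (hguard.mp hg).2), h3, pv_C_step cs _ hin, if_neg hc]
          omega
      · rw [if_neg (fun hg => hin (hguard.mp hg).1), h3,
            pv_C_top cs _ (by omega), pv_C_top cs _ (by omega)]
    rw [hcons, List.foldl_cons]
    simp only [hsuff]
    have hopen : (if PySem.List.pyGetD cs (k : Int) ' ' = '('
          ∧ PySem.List.pyGetD cs ((k : Int) + 1) ' ' = '('
        then t + pvC cs ((k : Int) + 2) else t) = t + pvG cs (k : Int) := by
      rw [pvG, pvOpen]
      by_cases ho : PySem.List.pyGetD cs (k : Int) ' ' = '('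
          ∧ PySem.List.pyGetD cs ((k : Int) + 1) ' ' = '('
      · rw [if_pos ho, if_pos (by simp [ho.1, ho.2])]
      · rw [if_neg ho, if_neg (fun hb => ho (by simpa using hb))]
        omega
    rw [hopen, ih (t + pvG cs (k : Int)) (by omega),
        PySem.List.pyRange_one_succ_right (by omega : (0:Int) ≤ (k : Int))]
    simp [List.sum_append]
    omega

-- ===== VERDICT (by name: the statement is the Claim_ definition above) =====
theorem solution_spec : Claim_equal_solution := by
  intro pattern _
  unfold Spec_solution solution solution_alt
  simp only [PySem.List.len_eq]
  by_cases h0 : pattern.toList.length = 0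
  · rw [PySem.List.pyRange_one_eq_nil (by omega : ((pattern.toList.length : Int) - 1) ≤ 0),
      PySem.List.pyRange_neg_one_eq_nil (by omega : ((pattern.toList.length : Int) - 2) ≤ -1)]
    rfl
  · have hB := pv_B_aux pattern.toList (pattern.toList.length - 1) 0
      (by rw [PySem.List.len_eq]; omega)
    have hA := pv_A_outer pattern.toList
      (PySem.List.pyRange 0 (PySem.List.len pattern.toList - 1)) 0
      (fun s hs => by rw [PySem.List.mem_pyRange_one] at hs; exact hs)
    rw [show ((pattern.toList.length - 1 : Nat) : Int) - 1 = PySem.List.len pattern.toList - 2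
          from by rw [PySem.List.len_eq]; omega,
        show ((pattern.toList.length - 1 : Nat) : Int) + 2 = PySem.List.len pattern.toList + 1
          from by rw [PySem.List.len_eq]; omega,
        pv_C_top pattern.toList _ (by rw [PySem.List.len_eq]; omega),
        show ((pattern.toList.length - 1 : Nat) : Int) = PySem.List.len pattern.toList - 1
          from by rw [PySem.List.len_eq]; omega] at hB
    simp only [PySem.List.len_eq] at hA hB
    rw [hA, hB]
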